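-- pv_equiv track=rewrite | github.com/gustavoadutra/min-max-genetic-evolution | minmax_agent.py | _count_center_control
-- ===== SOURCE A (Python) =====
-- def _count_center_control(board, player):
--     """Count pieces in center column and central area"""
--     count = 0
--
--     # Center column (higher weight)
--     for row in range(5):
--         if board[row][2] == player:  # Column 2 is the center in a 5x5 board
--             count += 2
--
--     # Central region (3x3 grid in the middle)
--     for row in range(1, 4):
--         for col in range(1, 4):
--             if board[row][col] == player:
--                 count += 1
--
--     return count
-- ===== SOURCE B (Python) =====
-- _WEIGHTS = {(0, 2): 2, (4, 2): 2,
--             (1, 2): 3, (2, 2): 3, (3, 2): 3,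
--             (1, 1): 1, (1, 3): 1,
--             (2, 1): 1, (2, 3): 1,
--             (3, 1): 1, (3, 3): 1}
--
--
-- def _count_center_control(board, player):
--     return sum(w for (r, c), w in _WEIGHTS.items() if board[r][c] == player)
-- ===== Notes on version B (the rewrite author's own statement) =====
-- stated objective: alternative
-- what changed: Replaces A's two separate region scans (center column, then 3x3 middle) by a single pass over a precomputed weight table (weight 3 where the regions overlap), summed in one comprehension.
import Mathlib
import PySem

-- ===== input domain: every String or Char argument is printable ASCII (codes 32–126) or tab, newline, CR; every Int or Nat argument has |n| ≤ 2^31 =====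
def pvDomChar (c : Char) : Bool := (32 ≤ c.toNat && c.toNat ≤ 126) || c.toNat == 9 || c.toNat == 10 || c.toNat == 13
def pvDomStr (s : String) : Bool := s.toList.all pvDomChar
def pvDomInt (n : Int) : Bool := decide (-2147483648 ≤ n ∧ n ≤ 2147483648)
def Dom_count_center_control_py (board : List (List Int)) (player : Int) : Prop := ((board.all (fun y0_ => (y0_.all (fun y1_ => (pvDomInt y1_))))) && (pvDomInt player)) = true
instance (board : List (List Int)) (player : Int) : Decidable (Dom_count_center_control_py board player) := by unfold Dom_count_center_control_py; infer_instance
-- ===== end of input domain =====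

-- B replaces A's two region scans by one pass over a precomputed weight table (alternative decomposition, same cost).

-- board[r][c] as an Option; none exactly where Python raises IndexError (excluded by Pre_)
def pvCell (board : List (List Int)) (r c : Int) : Option Int :=
  (PySem.List.pyGet? board r).bind (fun row => PySem.List.pyGet? row c)

-- ===== PORT A =====
-- two loops: center column (weight 2), then the middle 3x3 (weight 1)
def count_center_control_py (board : List (List Int)) (player : Int) : Int :=
  let count : Int := 0
  let count := (PySem.List.pyRange 0 5 1).foldl
    (fun acc r => if pvCell board r 2 = some player then acc + 2 else acc) count
  let count := (PySem.List.pyRange 1 4 1).foldl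
    (fun acc r => (PySem.List.pyRange 1 4 1).foldl
      (fun acc2 c => if pvCell board r c = some player then acc2 + 1 else acc2) acc) count
  count

-- ===== PORT B =====
-- the weight table _WEIGHTS, in dict insertion order
def pvWeights : List ((Int × Int) × Int) :=
  [((0, 2), 2), ((4, 2), 2),
   ((1, 2), 3), ((2, 2), 3), ((3, 2), 3),
   ((1, 1), 1), ((1, 3), 1),
   ((2, 1), 1), ((2, 3), 1),
   ((3, 1), 1), ((3, 3), 1)]

def count_center_control_py_alt (board : List (List Int)) (player : Int) : Int :=
  (pvWeights.foldl
    (fun acc rcw => if pvCell board rcw.1.1 rcw.1.2 = some player then acc + rcw.2 else acc) 0)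

-- ===== PRECONDITION & SPEC =====
-- Pre_ excludes exactly the boards on which Python A raises IndexError:
-- fewer than 5 rows, rows 0/4 shorter than 3, or rows 1–3 shorter than 4.
def Pre_count_center_control_py (board : List (List Int)) (player : Int) : Prop :=
  5 ≤ board.length ∧
  3 ≤ (board.getD 0 []).length ∧ 4 ≤ (board.getD 1 []).length ∧
  4 ≤ (board.getD 2 []).length ∧ 4 ≤ (board.getD 3 []).length ∧
  3 ≤ (board.getD 4 []).length
instance (board : List (List Int)) (player : Int) : Decidable (Pre_count_center_control_py board player) := by
  unfold Pre_count_center_control_py; infer_instance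

def pvWitness_count_center_control_py : List (List Int) × Int :=
  ([[0, 0, 1, 0, 0], [0, 1, 1, 0], [0, 0, 1, 0], [0, 0, 0, 1], [0, 0, 1]], 1)

def Spec_count_center_control_py (board : List (List Int)) (player : Int) (out : Int) : Prop := out = count_center_control_py_alt board player
instance (board : List (List Int)) (player : Int) (out : Int) : Decidable (Spec_count_center_control_py board player out) := by unfold Spec_count_center_control_py; infer_instance

-- ===== CLAIM (what is proved, stated in full; the proofs are below) =====
def Claim_equal_count_center_control_py : Prop := ∀ (board : List (List Int)) (player : Int), Dom_count_center_control_py board player → Pre_count_center_control_py board player → Spec_count_center_control_py board player (count_center_control_py board player)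

-- ===== LEMMAS AND PROOFS =====

-- push an if-accumulated step into 'acc + indicator' form
theorem pv_ite_acc (c : Prop) [Decidable c] (a k : Int) :
    (if c then a + k else a) = a + k * (if c then 1 else 0) := by
  split <;> simp

-- ===== VERDICT (by name: the statement is the Claim_ definition above) =====
theorem count_center_control_py_spec : Claim_equal_count_center_control_py := by
  intro board player _ _
  unfold Spec_count_center_control_py count_center_control_py count_center_control_py_alt pvWeights
  have h05 : PySem.List.pyRange 0 5 1 = [0, 1, 2, 3, 4] := by decide
  have h14 : PySem.List.pyRange 1 4 1 = [1, 2, 3] := by decide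
  rw [h05, h14]
  simp only [List.foldl, pv_ite_acc]
  ring
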